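-- pv_equiv track=rewrite | github.com/anilmarella/personalized_medicine | text_modification.py | build_phrases_vocabulary
-- ===== SOURCE A (Python) =====
-- window_size =2
--
-- def build_phrases_vocabulary(words):
--     res = []
--     for i in range(0, len(words) - window_size +1):
--         for j in range(1, window_size+1):
--             phrase = words[i]
--             if (i+j) < len(words):
--                 for x in range(1, j+1):
--                     phrase = phrase +" "+words[i+x]
--             else:
--                 break
--             res.append(phrase)
--     return res
-- ===== SOURCE B (Python) =====
-- def build_phrases_vocabulary(words):
--     n = len(words)
--     bigrams = [words[i] + " " + words[i + 1] for i in range(n - 1)]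
--     trigrams = [words[i] + " " + words[i + 1] + " " + words[i + 2] for i in range(n - 2)]
--     res = []
--     for i in range(len(bigrams)):
--         res.append(bigrams[i])
--         if i < len(trigrams):
--             res.append(trigrams[i])
--     return res
-- ===== Notes on version B (the rewrite author's own statement) =====
-- stated objective: alternative
-- what changed: A builds each phrase with a nested per-index incremental-concatenation loop with a break; B builds the bigram and trigram tables in two independent comprehension passes and then merges them in a third pass to recover the interleaved order.
import Mathlib
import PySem

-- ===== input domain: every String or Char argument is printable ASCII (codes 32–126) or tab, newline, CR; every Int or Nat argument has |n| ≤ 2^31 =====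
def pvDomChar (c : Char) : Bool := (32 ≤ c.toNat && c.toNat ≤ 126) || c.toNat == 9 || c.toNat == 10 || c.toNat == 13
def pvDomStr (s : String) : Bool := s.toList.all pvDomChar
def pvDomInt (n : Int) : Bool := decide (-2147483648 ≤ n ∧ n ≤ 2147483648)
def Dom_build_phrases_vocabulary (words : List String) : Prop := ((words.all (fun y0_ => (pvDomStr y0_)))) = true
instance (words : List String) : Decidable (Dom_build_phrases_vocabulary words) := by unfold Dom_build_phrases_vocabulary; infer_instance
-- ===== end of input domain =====

-- B replaces A's nested incremental-concatenation loop (with break) by two independent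
-- n-gram table passes followed by a merge pass; same cost, different decomposition.

-- ===== PORT A =====
def pv_window_size : Int := 2

-- inner 'for j in range(1, window_size+1)' loop with its break, step for step
def pvInnerA (words : List String) (i : Int) : List Int → List String → List String
  | [], res => res
  | j :: js, res =>
    -- phrase = words[i]; if (i+j) < len(words): for x in range(1, j+1): phrase = phrase + " " + words[i+x]
    if i + j < (words.length : Int) then
      pvInnerA words i js
        (res ++ [(PySem.List.pyRange 1 (j + 1) 1).foldl
            (fun phrase x => phrase ++ " " ++ PySem.List.pyGetD words (i + x) "")
            (PySem.List.pyGetD words i "")])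
    else res  -- break

def build_phrases_vocabulary (words : List String) : List String :=
  (PySem.List.pyRange 0 ((words.length : Int) - pv_window_size + 1) 1).foldl
    (fun res i => pvInnerA words i (PySem.List.pyRange 1 (pv_window_size + 1) 1) res) []

-- ===== PORT B =====
def build_phrases_vocabulary_alt (words : List String) : List String :=
  let n : Int := (words.length : Int)
  let bigrams : List String := (PySem.List.pyRange 0 (n - 1) 1).map
    (fun i => PySem.List.pyGetD words i "" ++ " " ++ PySem.List.pyGetD words (i + 1) "")
  let trigrams : List String := (PySem.List.pyRange 0 (n - 2) 1).map
    (fun i => PySem.List.pyGetD words i "" ++ " " ++ PySem.List.pyGetD words (i + 1) "" ++ " " ++ PySem.List.pyGetD words (i + 2) "")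
  (PySem.List.pyRange 0 ((bigrams.length : Int)) 1).foldl
    (fun res i =>
      let res := res ++ [PySem.List.pyGetD bigrams i ""]
      if i < (trigrams.length : Int) then res ++ [PySem.List.pyGetD trigrams i ""] else res) []

-- ===== PRECONDITION & SPEC =====
def Spec_build_phrases_vocabulary (words : List String) (out : List String) : Prop := out = build_phrases_vocabulary_alt words
instance (words : List String) (out : List String) : Decidable (Spec_build_phrases_vocabulary words out) := by unfold Spec_build_phrases_vocabulary; infer_instance

-- ===== CLAIM (what is proved, stated in full; the proofs are below) =====
def Claim_equal_build_phrases_vocabulary : Prop := ∀ (words : List String), Dom_build_phrases_vocabulary words → Spec_build_phrases_vocabulary words (build_phrases_vocabulary words)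

-- ===== LEMMAS AND PROOFS =====

-- the per-index block both programs append at position i (0 ≤ i < n-1)
def pvBlock (words : List String) (i : Int) : List String :=
  [PySem.List.pyGetD words i "" ++ " " ++ PySem.List.pyGetD words (i + 1) ""] ++
    (if i + 2 < (words.length : Int)
     then [PySem.List.pyGetD words i "" ++ " " ++ PySem.List.pyGetD words (i + 1) "" ++ " " ++ PySem.List.pyGetD words (i + 2) ""]
     else [])

theorem pvA_eq (words : List String) :
    build_phrases_vocabulary words =
      (PySem.List.pyRange 0 ((words.length : Int) - 1) 1).flatMap (pvBlock words) := by
  unfold build_phrases_vocabulary pv_window_size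
  have hb : (words.length : Int) - 2 + 1 = (words.length : Int) - 1 := by omega
  rw [hb]
  refine Eq.trans
    (PySem.List.foldl_congr_mem _ _ (fun res i => res ++ pvBlock words i) _ ?_) ?_
  · intro res i hi
    rw [PySem.List.mem_pyRange_one] at hi
    have h1 : i + 1 < (words.length : Int) := by omega
    have e3 : PySem.List.pyRange 1 (2 + 1) 1 = [1, 2] := by decide
    have e1 : PySem.List.pyRange 1 (1 + 1) 1 = [1] := by decide
    beta_reduce
    rw [e3]
    unfold pvInnerA
    rw [if_pos h1]
    unfold pvInnerA
    by_cases h2 : i + 2 < (words.length : Int)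
    · rw [if_pos h2]
      unfold pvInnerA pvBlock
      rw [if_pos h2, e1, e3]
      simp [List.foldl]
    · rw [if_neg h2]
      unfold pvBlock
      rw [if_neg h2, e1]
      simp [List.foldl]
  · rw [PySem.List.foldl_append_eq_flatMap]
    simp

theorem pvRange_toNat (n : Int) :
    PySem.List.pyRange 0 ((n.toNat : Int)) 1 = PySem.List.pyRange 0 n 1 := by
  by_cases h0 : 0 ≤ n
  · rw [Int.toNat_of_nonneg h0]
  · rw [PySem.List.pyRange_one_eq_nil (by omega), PySem.List.pyRange_one_eq_nil (by omega)]

theorem pvB_eq (words : List String) :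
    build_phrases_vocabulary_alt words =
      (PySem.List.pyRange 0 ((words.length : Int) - 1) 1).flatMap (pvBlock words) := by
  unfold build_phrases_vocabulary_alt
  simp only [List.length_map, PySem.List.length_pyRange_one, Int.sub_zero]
  rw [pvRange_toNat]
  refine Eq.trans
    (PySem.List.foldl_congr_mem _ _ (fun res i => res ++ pvBlock words i) _ ?_) ?_
  · intro res i hi
    rw [PySem.List.mem_pyRange_one] at hi
    beta_reduce
    unfold pvBlock
    by_cases h2 : i + 2 < (words.length : Int)
    · rw [if_pos (show i < ((((words.length : Int) - 2).toNat : Int)) by omega), if_pos h2,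
        PySem.List.pyGetD_map_pyRange_of_nonneg _ _ _ _ hi.1 hi.2,
        PySem.List.pyGetD_map_pyRange_of_nonneg _ _ _ _ hi.1 (by omega)]
      simp
    · rw [if_neg (show ¬ i < ((((words.length : Int) - 2).toNat : Int)) by omega), if_neg h2,
        PySem.List.pyGetD_map_pyRange_of_nonneg _ _ _ _ hi.1 hi.2]
      simp
  · rw [PySem.List.foldl_append_eq_flatMap]
    simp


-- ===== VERDICT (by name: the statement is the Claim_ definition above) =====
theorem build_phrases_vocabulary_spec : Claim_equal_build_phrases_vocabulary := by
  intro words _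
  unfold Spec_build_phrases_vocabulary
  rw [pvA_eq, pvB_eq]
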